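-- pv_equiv track=rewrite | github.com/BIOIN401/Project14-T2PW | src/pipeline.py | _find_last_safe_cut
-- ===== SOURCE A (Python) =====
-- from typing import Any, Callable, Dict, List, Optional, Tuple
--
-- def _find_last_safe_cut(text: str) -> Optional[int]:
--     """
--     Find a fallback cut position outside strings, preferring commas, then object/array starts.
--     """
--     in_string = False
--     escape = False
--     last_comma = -1
--     last_open = -1
--
--     for i, ch in enumerate(text):
--         if in_string:
--             if escape:
--                 escape = False
--             elif ch == "\\":
--                 escape = True
--             elif ch == '"':
--                 in_string = False
--             continue
--
--         if ch == '"':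
--             in_string = True
--             continue
--         if ch == ",":
--             last_comma = i
--         elif ch in "{[":
--             last_open = i
--
--     if last_comma >= 0:
--         return last_comma
--     if last_open >= 0:
--         return last_open + 1
--     return None
-- ===== SOURCE B (Python) =====
-- def _find_last_safe_cut(text):
--     # Two-phase: blank out every JSON string literal (index-preserving mask),
--     # then use str.rfind on the masked text.
--     n = len(text)
--     masked = list(text)
--     i = 0
--     while i < n:
--         if text[i] == '"':
--             masked[i] = ' '
--             i += 1
--             while i < n:
--                 c = text[i]
--                 masked[i] = ' '
--                 if c == '\\':
--                     if i + 1 < n: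
--                         masked[i + 1] = ' '
--                     i += 2
--                 elif c == '"':
--                     i += 1
--                     break
--                 else:
--                     i += 1
--         else:
--             i += 1
--     m = ''.join(masked)
--     last_comma = m.rfind(',')
--     last_open = max(m.rfind('{'), m.rfind('['))
--     if last_comma >= 0:
--         return last_comma
--     if last_open >= 0:
--         return last_open + 1
--     return None
-- ===== Notes on version B (the rewrite author's own statement) =====
-- stated objective: alternative
-- what changed: Replaces A's single-pass in_string/escape state machine (tracking last comma/open bracket on the fly) by a two-phase method: build an index-preserving masked copy of the text with every string literal blanked out, then locate the cut with str.rfind on the mask.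
import Mathlib
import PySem

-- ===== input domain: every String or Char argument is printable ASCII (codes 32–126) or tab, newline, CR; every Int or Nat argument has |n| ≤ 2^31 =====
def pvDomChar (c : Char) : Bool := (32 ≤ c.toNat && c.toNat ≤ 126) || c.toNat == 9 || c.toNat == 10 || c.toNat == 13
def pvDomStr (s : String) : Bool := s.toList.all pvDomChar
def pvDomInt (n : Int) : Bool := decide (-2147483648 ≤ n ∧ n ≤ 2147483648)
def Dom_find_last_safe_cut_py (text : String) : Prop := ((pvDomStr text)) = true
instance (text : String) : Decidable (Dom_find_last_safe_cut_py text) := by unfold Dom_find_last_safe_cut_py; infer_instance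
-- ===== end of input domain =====

-- B replaces A's single-pass in_string/escape state machine by a two-phase method: blank out the
-- string literals in an index-preserving mask, then str.rfind on the mask (objective: alternative).

-- ===== PORT A =====
-- state = (in_string, escape, last_comma, last_open); one loop step of A
def pvStepA : Bool × Bool × Int × Int → Int × Char → Bool × Bool × Int × Int
  | (true, true, last_comma, last_open), _ => (true, false, last_comma, last_open)
  | (true, false, last_comma, last_open), (_, ch) =>
    if ch = '\\' then (true, true, last_comma, last_open)
    else if ch = '"' then (false, false, last_comma, last_open)
    else (true, false, last_comma, last_open)
  | (false, escape, last_comma, last_open), (i, ch) =>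
    if ch = '"' then (true, escape, last_comma, last_open)
    else if ch = ',' then (false, escape, i, last_open)
    else if ch = '{' ∨ ch = '[' then (false, escape, last_comma, i)
    else (false, escape, last_comma, last_open)

def find_last_safe_cut_py (text : String) : Option Int :=
  let st := (PySem.List.enumerate text.toList 0).foldl pvStepA (false, false, -1, -1)
  if 0 ≤ st.2.2.1 then some st.2.2.1
  else if 0 ≤ st.2.2.2 then some (st.2.2.2 + 1)
  else none

-- ===== PORT B =====
mutual
-- outer loop of Source B: copy chars until an opening quote
def pvMask : List Char → List Char
  | [] => []
  | c :: rest => if c = '"' then ' ' :: pvMaskStr rest else c :: pvMask rest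
-- inner loop of Source B: blank the body of a string literal (a backslash also blanks the next char)
def pvMaskStr : List Char → List Char
  | [] => []
  | c :: rest =>
    if c = '\\' then
      match rest with
      | [] => [' ']
      | _ :: rest' => ' ' :: ' ' :: pvMaskStr rest'
    else if c = '"' then ' ' :: pvMask rest
    else ' ' :: pvMaskStr rest
end

def find_last_safe_cut_py_alt (text : String) : Option Int :=
  let masked := pvMask text.toList
  let last_comma := PySem.Chars.rfind masked [',']
  let last_open := max (PySem.Chars.rfind masked ['{']) (PySem.Chars.rfind masked ['['])
  if 0 ≤ last_comma then some last_comma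
  else if 0 ≤ last_open then some (last_open + 1)
  else none

-- ===== PRECONDITION & SPEC =====
def Spec_find_last_safe_cut_py (text : String) (out : Option Int) : Prop := out = find_last_safe_cut_py_alt text
instance (text : String) (out : Option Int) : Decidable (Spec_find_last_safe_cut_py text out) := by unfold Spec_find_last_safe_cut_py; infer_instance

-- ===== CLAIM (what is proved, stated in full; the proofs are below) =====
def Claim_equal_find_last_safe_cut_py : Prop := ∀ (text : String), Dom_find_last_safe_cut_py text → Spec_find_last_safe_cut_py text (find_last_safe_cut_py text)

-- ===== LEMMAS AND PROOFS =====

lemma pvMask_nil : pvMask [] = [] := by rw [pvMask.eq_def]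
lemma pvMask_cons (c : Char) (rest : List Char) :
    pvMask (c :: rest) = if c = '"' then ' ' :: pvMaskStr rest else c :: pvMask rest := by
  rw [pvMask.eq_def]
lemma pvMaskStr_nil : pvMaskStr [] = [] := by rw [pvMaskStr.eq_def]
lemma pvMaskStr_cons (c : Char) (rest : List Char) :
    pvMaskStr (c :: rest) =
      if c = '\\' then
        (match rest with
         | [] => [' ']
         | _ :: rest' => ' ' :: ' ' :: pvMaskStr rest')
      else if c = '"' then ' ' :: pvMask rest
      else ' ' :: pvMaskStr rest := by
  rw [pvMaskStr.eq_def]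

-- proof-only: the comma/open tracking A does, run on already-masked text
def pvSimple : List Char → Int → Int × Int → Int × Int
  | [], _, s => s
  | c :: cs, i, (lc, lo) =>
      pvSimple cs (i + 1) (if c = ',' then i else lc, if c = '{' ∨ c = '[' then i else lo)

lemma pvGo_zero (s sub : List Char) :
    PySem.Chars.rfind.go s sub 0 = if sub.isPrefixOf s then 0 else -1 := rfl

lemma pvGo_succ (s sub : List Char) (j : Nat) :
    PySem.Chars.rfind.go s sub (j + 1) =
      if sub.isPrefixOf (s.drop (j + 1)) then ((j : Int) + 1)
      else PySem.Chars.rfind.go s sub j := rfl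

lemma pvGo_cons (c t : Char) (cs : List Char) : ∀ j : Nat,
    PySem.Chars.rfind.go (c :: cs) [t] (j + 1) =
      if 0 ≤ PySem.Chars.rfind.go cs [t] j then PySem.Chars.rfind.go cs [t] j + 1
      else if c = t then 0 else -1 := by
  intro j
  induction j with
  | zero =>
      rw [pvGo_succ, pvGo_zero, pvGo_zero]
      simp only [List.drop_succ_cons, List.drop_zero, List.isPrefixOf, Bool.and_true]
      split_ifs <;> simp_all
  | succ j ih =>
      rw [pvGo_succ, ih, pvGo_succ cs]
      have : (c :: cs).drop (j + 1 + 1) = cs.drop (j + 1) := by simp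
      rw [this]
      split_ifs <;> omega

lemma pvRfind_nil (t : Char) : PySem.Chars.rfind [] [t] = -1 := by
  simp [PySem.Chars.rfind, pvGo_zero, List.isPrefixOf]

lemma pvRfind_cons (c t : Char) (cs : List Char) :
    PySem.Chars.rfind (c :: cs) [t] =
      if 0 ≤ PySem.Chars.rfind cs [t] then PySem.Chars.rfind cs [t] + 1
      else if c = t then 0 else -1 := by
  simpa [PySem.Chars.rfind, List.length] using pvGo_cons c t cs cs.length

lemma pvRfind_ge (t : Char) (cs : List Char) : -1 ≤ PySem.Chars.rfind cs [t] := by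
  induction cs with
  | nil => simp [pvRfind_nil]
  | cons c cs ih => rw [pvRfind_cons]; split_ifs <;> omega

lemma pvSimple_eq (cs : List Char) : ∀ (i lc lo : Int),
    pvSimple cs i (lc, lo) =
      (if 0 ≤ PySem.Chars.rfind cs [','] then i + PySem.Chars.rfind cs [','] else lc,
       if 0 ≤ max (PySem.Chars.rfind cs ['{']) (PySem.Chars.rfind cs ['[']) then
         i + max (PySem.Chars.rfind cs ['{']) (PySem.Chars.rfind cs ['[']) else lo) := by
  induction cs with
  | nil => intro i lc lo; simp [pvSimple, pvRfind_nil]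
  | cons c cs ih =>
      intro i lc lo
      have h1 := pvRfind_ge ',' cs
      have h2 := pvRfind_ge '{' cs
      have h3 := pvRfind_ge '[' cs
      rw [pvSimple, ih, pvRfind_cons, pvRfind_cons, pvRfind_cons, Prod.mk.injEq]
      constructor
      · split_ifs <;> omega
      · simp only [max_def]
        split_ifs <;> first | omega | (exfalso; subst_vars; simp_all)

-- relate A's state machine to pvSimple over the masked text
lemma pvLoop_mask (n : Nat) : ∀ cs : List Char, cs.length ≤ n →
    (∀ (i lc lo : Int),
      ((PySem.List.enumerate cs i).foldl pvStepA (false, false, lc, lo)).2.2 =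
        pvSimple (pvMask cs) i (lc, lo))
    ∧ (∀ (i lc lo : Int),
      ((PySem.List.enumerate cs i).foldl pvStepA (true, false, lc, lo)).2.2 =
        pvSimple (pvMaskStr cs) i (lc, lo)) := by
  induction n with
  | zero =>
      intro cs hcs
      have : cs = [] := List.eq_nil_of_length_eq_zero (Nat.le_zero.mp hcs)
      subst this
      simp [PySem.List.enumerate_nil, pvMask_nil, pvMaskStr_nil, pvSimple]
  | succ n ih =>
      intro cs hcs
      cases cs with
      | nil => simp [PySem.List.enumerate_nil, pvMask_nil, pvMaskStr_nil, pvSimple]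
      | cons c cs' =>
        have hlen : cs'.length ≤ n := by simpa using Nat.succ_le_succ_iff.mp hcs
        constructor
        · intro i lc lo
          rw [PySem.List.enumerate_cons, List.foldl_cons]
          by_cases hq : c = '"'
          · subst hq
            have hstep : pvStepA (false, false, lc, lo) (i, '"') = (true, false, lc, lo) := by
              simp [pvStepA]
            rw [hstep, (ih cs' hlen).2 (i + 1) lc lo]
            simp [pvMask_cons, pvSimple]
          · by_cases hcm : c = ','
            · subst hcm
              have hstep : pvStepA (false, false, lc, lo) (i, ',') = (false, false, i, lo) := by
                simp [pvStepA]
              rw [hstep, (ih cs' hlen).1 (i + 1) i lo]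
              simp [pvMask_cons, pvSimple]
            · rcases (by tauto : c = '{' ∨ c = '[' ∨ (¬ c = '{' ∧ ¬ c = '[')) with ho | ho | ⟨ho1, ho2⟩
              · subst ho
                have hstep : pvStepA (false, false, lc, lo) (i, '{') = (false, false, lc, i) := by
                  simp [pvStepA]
                rw [hstep, (ih cs' hlen).1 (i + 1) lc i]
                simp [pvMask_cons, pvSimple]
              · subst ho
                have hstep : pvStepA (false, false, lc, lo) (i, '[') = (false, false, lc, i) := by
                  simp [pvStepA]
                rw [hstep, (ih cs' hlen).1 (i + 1) lc i]
                simp [pvMask_cons, pvSimple]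
              · have hstep : pvStepA (false, false, lc, lo) (i, c) = (false, false, lc, lo) := by
                  simp [pvStepA, hq, hcm, ho1, ho2]
                rw [hstep, (ih cs' hlen).1 (i + 1) lc lo]
                simp [pvMask_cons, pvSimple, hq, hcm, ho1, ho2]
        · intro i lc lo
          by_cases hb : c = '\\'
          · subst hb
            cases cs' with
            | nil =>
              simp [PySem.List.enumerate_cons, PySem.List.enumerate_nil, pvStepA,
                pvMaskStr_cons, pvSimple]
            | cons d rest' =>
              rw [PySem.List.enumerate_cons, List.foldl_cons, PySem.List.enumerate_cons,
                List.foldl_cons]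
              have h1 : pvStepA (true, false, lc, lo) (i, '\\') = (true, true, lc, lo) := by
                simp [pvStepA]
              have h2 : pvStepA (true, true, lc, lo) (i + 1, d) = (true, false, lc, lo) := by
                simp [pvStepA]
              have hlen' : rest'.length ≤ n := by simp at hcs; omega
              rw [h1, h2, (ih rest' hlen').2 (i + 1 + 1) lc lo]
              have hm : pvMaskStr ('\\' :: d :: rest') = ' ' :: ' ' :: pvMaskStr rest' := by
                simp [pvMaskStr_cons]
              rw [hm]
              simp [pvSimple]
          · rw [PySem.List.enumerate_cons, List.foldl_cons]
            by_cases hq : c = '"'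
            · subst hq
              have hstep : pvStepA (true, false, lc, lo) (i, '"') = (false, false, lc, lo) := by
                simp [pvStepA]
              rw [hstep, (ih cs' hlen).1 (i + 1) lc lo]
              simp [pvMaskStr_cons, pvSimple]
            · have hstep : pvStepA (true, false, lc, lo) (i, c) = (true, false, lc, lo) := by
                simp [pvStepA, hb, hq]
              rw [hstep, (ih cs' hlen).2 (i + 1) lc lo]
              simp [pvMaskStr_cons, pvSimple, hb, hq]

-- ===== VERDICT (by name: the statement is the Claim_ definition above) =====
theorem find_last_safe_cut_py_spec : Claim_equal_find_last_safe_cut_py := by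
  intro text _
  unfold Spec_find_last_safe_cut_py find_last_safe_cut_py find_last_safe_cut_py_alt
  dsimp only
  rw [((pvLoop_mask text.toList.length) text.toList le_rfl).1 0 (-1) (-1), pvSimple_eq]
  have h1 := pvRfind_ge ',' (pvMask text.toList)
  have h2 := pvRfind_ge '{' (pvMask text.toList)
  have h3 := pvRfind_ge '[' (pvMask text.toList)
  simp only [max_def] at *
  split_ifs <;> simp_all
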